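-- pv_equiv track=rewrite | github.com/jrnastase410/fantasy-hockey-draft-app | yfh/functions.py | get_pick_numbers
-- ===== SOURCE A (Python) =====
-- def get_pick_numbers(num_teams_in_draft, my_pick_slot, num_rounds):
--     """
--     For a serpentine draft, return the pick numbers for the team that starts at `my_pick_slot`.
--
--     Args:
--         num_teams_in_draft (int): The total number of teams in the draft.
--         my_pick_slot (int): Your pick position in the first round (1-indexed).
--         num_rounds (int): The total number of rounds in the draft.
--
--     Returns:
--         list: A list of pick numbers for each round.
--     """
--     picks = []
--
--     for round_num in range(1, num_rounds + 1):
--         if round_num % 2 != 0: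
--             # Odd rounds: normal order
--             pick_number = (round_num - 1) * num_teams_in_draft + my_pick_slot
--         else:
--             # Even rounds: reverse order
--             pick_number = round_num * num_teams_in_draft - (my_pick_slot - 1)
--
--         picks.append(pick_number)
--
--     return picks
-- ===== SOURCE B (Python) =====
-- def get_pick_numbers(num_teams_in_draft, my_pick_slot, num_rounds):
--     """Serpentine draft picks, computed incrementally with alternating step sizes."""
--     if num_rounds <= 0:
--         return []
--     step_up = 2 * (num_teams_in_draft - my_pick_slot) + 1
--     step_down = 2 * my_pick_slot - 1
--     pick = my_pick_slot
--     picks = [pick]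
--     for r in range(2, num_rounds + 1):
--         pick += step_up if r % 2 == 0 else step_down
--         picks.append(pick)
--     return picks
-- ===== Notes on version B (the rewrite author's own statement) =====
-- stated objective: alternative
-- what changed: B replaces A's per-round closed-form formula with an incremental accumulator: it starts at my_pick_slot and alternately adds the two constant serpentine step sizes (2*(N-slot)+1 after odd rounds, 2*slot-1 after even rounds), so no per-round multiplication is done.
import Mathlib
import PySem

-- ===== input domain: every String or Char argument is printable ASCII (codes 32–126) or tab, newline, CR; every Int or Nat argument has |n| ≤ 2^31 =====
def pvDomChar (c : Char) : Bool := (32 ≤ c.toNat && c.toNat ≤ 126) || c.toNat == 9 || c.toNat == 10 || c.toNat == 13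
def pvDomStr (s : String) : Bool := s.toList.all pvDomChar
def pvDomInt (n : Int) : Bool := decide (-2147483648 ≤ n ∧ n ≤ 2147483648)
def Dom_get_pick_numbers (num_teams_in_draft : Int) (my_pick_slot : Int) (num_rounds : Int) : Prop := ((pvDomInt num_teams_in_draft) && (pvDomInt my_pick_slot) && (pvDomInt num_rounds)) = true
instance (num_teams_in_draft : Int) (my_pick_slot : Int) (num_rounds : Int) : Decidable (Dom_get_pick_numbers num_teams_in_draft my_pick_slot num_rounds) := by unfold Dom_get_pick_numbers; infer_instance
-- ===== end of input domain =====

-- B computes the serpentine pick numbers incrementally with two alternating constant steps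
-- instead of A's per-round closed-form formula (objective: alternative; same O(num_rounds) cost).


-- ===== PORT A =====
def get_pick_numbers (num_teams_in_draft : Int) (my_pick_slot : Int) (num_rounds : Int) : List Int :=
  (PySem.List.pyRange 1 (num_rounds + 1) 1).foldl
    (fun picks round_num =>
      picks ++ [if PySem.Int.mod round_num 2 ≠ 0 then
                  (round_num - 1) * num_teams_in_draft + my_pick_slot
                else
                  round_num * num_teams_in_draft - (my_pick_slot - 1)]) []

-- ===== PORT B =====
def get_pick_numbers_alt (num_teams_in_draft : Int) (my_pick_slot : Int) (num_rounds : Int) : List Int :=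
  if num_rounds ≤ 0 then []
  else
    let step_up := 2 * (num_teams_in_draft - my_pick_slot) + 1
    let step_down := 2 * my_pick_slot - 1
    ((PySem.List.pyRange 2 (num_rounds + 1) 1).foldl
      (fun (st : Int × List Int) r =>
        let pick := st.1 + (if PySem.Int.mod r 2 = 0 then step_up else step_down)
        (pick, st.2 ++ [pick]))
      (my_pick_slot, [my_pick_slot])).2

-- ===== PRECONDITION & SPEC =====
def Spec_get_pick_numbers (num_teams_in_draft : Int) (my_pick_slot : Int) (num_rounds : Int) (out : List Int) : Prop := out = get_pick_numbers_alt num_teams_in_draft my_pick_slot num_rounds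
instance (num_teams_in_draft : Int) (my_pick_slot : Int) (num_rounds : Int) (out : List Int) : Decidable (Spec_get_pick_numbers num_teams_in_draft my_pick_slot num_rounds out) := by unfold Spec_get_pick_numbers; infer_instance

-- ===== CLAIM (what is proved, stated in full; the proofs are below) =====
def Claim_equal_get_pick_numbers : Prop := ∀ (num_teams_in_draft : Int) (my_pick_slot : Int) (num_rounds : Int), Dom_get_pick_numbers num_teams_in_draft my_pick_slot num_rounds → Spec_get_pick_numbers num_teams_in_draft my_pick_slot num_rounds (get_pick_numbers num_teams_in_draft my_pick_slot num_rounds)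

-- ===== LEMMAS AND PROOFS =====

-- A's round-n pick value (the closed form A appends for round n)
def pvVal (T s n : Int) : Int :=
  if PySem.Int.mod n 2 ≠ 0 then (n - 1) * T + s else n * T - (s - 1)

-- Invariant: for n ≥ 1, B's fold state after rounds 2..n is (A's round-n value, A's list).
theorem pv_inv (T s : Int) :
    ∀ n : Int, 1 ≤ n →
      (PySem.List.pyRange 2 (n + 1) 1).foldl
        (fun (st : Int × List Int) r =>
          let pick := st.1 + (if PySem.Int.mod r 2 = 0 then 2 * (T - s) + 1 else 2 * s - 1)
          (pick, st.2 ++ [pick])) (s, [s])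
      = (pvVal T s n, get_pick_numbers T s n) := by
  intro n hn
  induction n, hn using Int.le_induction with
  | base =>
      rw [show (1:Int)+1 = 2 from rfl, PySem.List.pyRange_one_eq_nil (le_refl 2)]
      unfold get_pick_numbers pvVal
      rw [show (2:Int) = 1+1 from rfl, PySem.List.pyRange_one_singleton]
      norm_num [PySem.Int.mod]
      intro h
      exact absurd h (by decide)
  | succ n hn ih =>
      have hA : PySem.List.pyRange 1 (n + 1 + 1) 1
          = PySem.List.pyRange 1 (n + 1) 1 ++ [n + 1] :=
        PySem.List.pyRange_one_succ_right (by omega)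
      have hB : PySem.List.pyRange 2 (n + 1 + 1) 1
          = PySem.List.pyRange 2 (n + 1) 1 ++ [n + 1] :=
        PySem.List.pyRange_one_succ_right (by omega)
      rw [hB, List.foldl_append, ih]
      unfold get_pick_numbers
      rw [hA, List.foldl_append]
      have h2 : (0:Int) < 2 := by omega
      simp only [pvVal, PySem.Int.mod_eq_emod_of_pos h2, List.foldl_cons, List.foldl_nil]
      have hpar : (n + 1) % 2 = 0 ∨ (n + 1) % 2 = 1 := by omega
      rcases hpar with h | h
      · have hn2 : n % 2 = 1 := by omega
        simp only [h, hn2]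
        norm_num
        ring
      · have hn2 : n % 2 = 0 := by omega
        simp only [h, hn2]
        norm_num
        ring

-- ===== VERDICT (by name: the statement is the Claim_ definition above) =====
theorem get_pick_numbers_spec : Claim_equal_get_pick_numbers := by
  intro T s n _
  unfold Spec_get_pick_numbers get_pick_numbers_alt
  by_cases hn : n ≤ 0
  · simp only [hn, if_true]
    unfold get_pick_numbers
    rw [PySem.List.pyRange_one_eq_nil (by omega)]
    rfl
  · simp only [hn, if_false]
    rw [pv_inv T s n (by omega)]
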